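-- pv_equiv track=rewrite | github.com/MrBrantCode/unitest_baseline | mut_generate/mist_train_cf/cf_7859/solution.py | findSmallestOddPrimeIndex
-- ===== SOURCE A (Python) =====
-- import math
--
-- def findSmallestOddPrimeIndex(arr):
--     smallestOddPrimeIndex = -1
--     for i in range(len(arr)):
--         if isOddPrime(arr[i]):
--             if smallestOddPrimeIndex == -1:
--                 smallestOddPrimeIndex = i
--             else:
--                 if arr[i] < arr[smallestOddPrimeIndex]:
--                     smallestOddPrimeIndex = i
--     return smallestOddPrimeIndex
--
-- def isOddPrime(num):
--     if num == 2:
--         return True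
--     if num < 2 or num % 2 == 0:
--         return False
--     for i in range(3, int(math.sqrt(num))+1, 2):
--         if num % i == 0:
--             return False
--     return True
-- ===== SOURCE B (Python) =====
-- import math
--
-- def findSmallestOddPrimeIndex(arr):
--     for v, i in sorted((arr[i], i) for i in range(len(arr))):
--         if isOddPrime(v):
--             return i
--     return -1
--
-- def isOddPrime(num):
--     if num == 2:
--         return True
--     if num < 2 or num % 2 == 0:
--         return False
--     for i in range(3, int(math.sqrt(num))+1, 2):
--         if num % i == 0:
--             return False
--     return True
-- ===== Notes on version B (the rewrite author's own statement) =====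
-- stated objective: alternative
-- what changed: A's single fused pass with a running best index and -1 sentinel is replaced by sorting the (value, index) pairs and returning the index of the first odd prime in that sorted order (lex order reproduces the first-minimum tie-break); isOddPrime is unchanged.
import Mathlib
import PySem

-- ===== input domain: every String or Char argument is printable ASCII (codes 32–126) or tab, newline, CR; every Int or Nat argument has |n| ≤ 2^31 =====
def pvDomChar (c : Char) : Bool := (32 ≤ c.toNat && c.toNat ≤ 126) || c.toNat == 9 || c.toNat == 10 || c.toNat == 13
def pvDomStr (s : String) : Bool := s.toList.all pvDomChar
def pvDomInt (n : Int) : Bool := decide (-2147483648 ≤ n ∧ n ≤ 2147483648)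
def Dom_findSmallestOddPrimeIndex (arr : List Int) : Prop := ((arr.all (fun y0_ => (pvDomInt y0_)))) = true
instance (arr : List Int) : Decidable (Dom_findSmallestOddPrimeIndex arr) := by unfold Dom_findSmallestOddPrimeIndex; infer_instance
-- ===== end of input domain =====

-- B replaces A's fused single pass (running best index with a -1 sentinel) by sorting
-- the (value, index) pairs and returning the index of the first odd prime in sorted
-- order (lex order reproduces A's first-minimum tie-break); objective: alternative.


-- ===== PORT A =====
-- helper shared verbatim by both Pythons (Source B keeps isOddPrime unchanged).
-- int(math.sqrt(num)) is ported as Nat.sqrt num.toNat: exact for the reachable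
-- 2 < num ≤ 2^31 (double sqrt of such ints never truncates below the integer sqrt).
def isOddPrime (num : Int) : Bool :=
  if num == 2 then true
  else if num < 2 || PySem.Int.mod num 2 == 0 then false
  else !((PySem.List.pyRange 3 ((Nat.sqrt num.toNat : Int) + 1) 2).any
          (fun i => PySem.Int.mod num i == 0))

def findSmallestOddPrimeIndex (arr : List Int) : Int :=
  (PySem.List.pyRange 0 (PySem.List.len arr) 1).foldl
    (fun s i =>
      if isOddPrime (PySem.List.pyGetD arr i 0) then
        if s == -1 then i
        else if PySem.List.pyGetD arr i 0 < PySem.List.pyGetD arr s 0 then i else s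
      else s) (-1)

-- ===== PORT B =====
-- 'sorted((arr[i], i) for i in range(len(arr)))' sorts by the tuple, i.e. PySem.List.sorted2
-- with the two projections; the for-loop with early 'return i' is find? on the sorted list.
def findSmallestOddPrimeIndex_alt (arr : List Int) : Int :=
  let pairs := (PySem.List.pyRange 0 (PySem.List.len arr) 1).map
      (fun i => (PySem.List.pyGetD arr i 0, i))
  match (PySem.List.sorted2 pairs (fun p => p.1) (fun p => p.2)).find?
      (fun p => isOddPrime p.1) with
  | some p => p.2
  | none => -1

-- ===== PRECONDITION & SPEC =====
def Spec_findSmallestOddPrimeIndex (arr : List Int) (out : Int) : Prop := out = findSmallestOddPrimeIndex_alt arr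
instance (arr : List Int) (out : Int) : Decidable (Spec_findSmallestOddPrimeIndex arr out) := by unfold Spec_findSmallestOddPrimeIndex; infer_instance

-- ===== CLAIM (what is proved, stated in full; the proofs are below) =====
def Claim_equal_findSmallestOddPrimeIndex : Prop := ∀ (arr : List Int), Dom_findSmallestOddPrimeIndex arr → Spec_findSmallestOddPrimeIndex arr (findSmallestOddPrimeIndex arr)

-- ===== LEMMAS AND PROOFS =====

-- the boolean strict lexicographic order sorted2 uses on (value, index) pairs
def lexlt (p q : Int × Int) : Bool :=
  decide (p.1 < q.1) || (!decide (q.1 < p.1) && decide (p.2 < q.2))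

-- its non-strict Prop complement: lex ≤
def wle (p q : Int × Int) : Prop := p.1 < q.1 ∨ (p.1 = q.1 ∧ p.2 ≤ q.2)

theorem lexlt_false_iff (p q : Int × Int) : lexlt q p = false ↔ wle p q := by
  simp [lexlt, wle]; omega

theorem wle_refl (p : Int × Int) : wle p p := by simp [wle]

theorem wle_trans {p q r : Int × Int} (h1 : wle p q) (h2 : wle q r) : wle p r := by
  unfold wle at *; omega

theorem insertBy_cons {α : Type} (b : α → α → Bool) (x y : α) (ys : List α) :
    PySem.List.insertBy b x (y :: ys) =
      if b x y then x :: y :: ys else y :: PySem.List.insertBy b x ys := rfl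

theorem pairwise_insertBy (x : Int × Int) (l : List (Int × Int))
    (h : l.Pairwise wle) : (PySem.List.insertBy lexlt x l).Pairwise wle := by
  induction l with
  | nil => simp [PySem.List.insertBy]
  | cons y ys ih =>
    rw [insertBy_cons]
    rcases List.pairwise_cons.mp h with ⟨hy, hys⟩
    by_cases hb : lexlt x y = true
    · rw [if_pos hb]
      have hxy : wle x y := by
        rw [← lexlt_false_iff]
        simp only [lexlt] at *
        simp at hb ⊢; omega
      exact List.pairwise_cons.mpr ⟨by
        intro z hz
        rcases List.mem_cons.mp hz with rfl | hz'
        · exact hxy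
        · exact wle_trans hxy (hy z hz'), h⟩
    · rw [if_neg hb]
      refine List.pairwise_cons.mpr ⟨?_, ih hys⟩
      intro z hz
      rcases (PySem.List.mem_insertBy lexlt x z ys).mp hz with rfl | hz'
      · exact (lexlt_false_iff y z).mp (eq_false_of_ne_true hb)
      · exact hy z hz'

theorem sorted2_pairwise (xs : List (Int × Int)) :
    (PySem.List.sorted2 xs (fun p => p.1) (fun p => p.2)).Pairwise wle := by
  show (xs.foldl (fun acc x => PySem.List.insertBy lexlt x acc) []).Pairwise wle
  have : ∀ (l : List (Int × Int)) (acc : List (Int × Int)), acc.Pairwise wle →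
      (l.foldl (fun acc x => PySem.List.insertBy lexlt x acc) acc).Pairwise wle := by
    intro l
    induction l with
    | nil => intro acc h; exact h
    | cons a t ih => intro acc h; exact ih _ (pairwise_insertBy a acc h)
  exact this xs [] List.Pairwise.nil

-- the first match in a lex-sorted list is lex-≤ every match
theorem find?_first {S : List (Int × Int)} {pred : Int × Int → Bool} {p : Int × Int}
    (h : S.Pairwise wle) (hf : S.find? pred = some p) :
    pred p = true ∧ p ∈ S ∧ ∀ q ∈ S, pred q = true → wle p q := by
  induction S with
  | nil => simp at hf
  | cons a t ih =>
    rcases List.pairwise_cons.mp h with ⟨ha, ht⟩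
    by_cases hp : pred a = true
    · rw [List.find?_cons_of_pos hp] at hf
      obtain rfl : a = p := by injection hf
      refine ⟨hp, List.mem_cons_self, ?_⟩
      intro q hq _
      rcases List.mem_cons.mp hq with rfl | hq'
      · exact wle_refl q
      · exact ha q hq'
    · rw [List.find?_cons_of_neg hp] at hf
      obtain ⟨h1, h2, h3⟩ := ih ht hf
      refine ⟨h1, List.mem_cons_of_mem _ h2, ?_⟩
      intro q hq hpq
      rcases List.mem_cons.mp hq with rfl | hq'
      · exact absurd hpq hp
      · exact h3 q hq' hpq

-- min? on a cons is the plain running-min foldl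
theorem min?_cons (key : Int → Int) : ∀ (t : List Int) (x : Int),
    PySem.List.min? (x :: t) key =
      some (t.foldl (fun m y => if key y < key m then y else m) x) := by
  intro t
  induction t with
  | nil => intro x; rfl
  | cons y t' ih =>
    intro x
    have h0 : PySem.List.min? (x :: y :: t') key =
        PySem.List.min? ((if key y < key x then y else x) :: t') key := by
      by_cases h : key y < key x <;> simp [PySem.List.min?, List.foldl_cons, h]
    rw [h0, ih, List.foldl_cons]

-- the running min over a strictly increasing list: first element attaining the minimum key
theorem foldl_min_first (key : Int → Int) :
    ∀ (t : List Int) (x : Int), (∀ j ∈ t, x < j) → t.Pairwise (· < ·) →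
    (t.foldl (fun m y => if key y < key m then y else m) x = x ∨
       t.foldl (fun m y => if key y < key m then y else m) x ∈ t) ∧
    (t.foldl (fun m y => if key y < key m then y else m) x ≠ x →
       key (t.foldl (fun m y => if key y < key m then y else m) x) < key x) ∧
    (∀ j ∈ t, key (t.foldl (fun m y => if key y < key m then y else m) x) < key j ∨
       (key (t.foldl (fun m y => if key y < key m then y else m) x) = key j ∧
        t.foldl (fun m y => if key y < key m then y else m) x ≤ j)) := by
  intro t
  induction t with
  | nil => intro x _ _; exact ⟨Or.inl rfl, fun h => absurd rfl h, by simp⟩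
  | cons y t' ih =>
    intro x hx hp
    rcases List.pairwise_cons.mp hp with ⟨hy, hp'⟩
    simp only [List.foldl_cons]
    by_cases hk : key y < key x
    · rw [if_pos hk]
      obtain ⟨m1, m2, m3⟩ := ih y hy hp'
      set m := t'.foldl (fun m y => if key y < key m then y else m) y with hm
      refine ⟨?_, ?_, ?_⟩
      · rcases m1 with h | h
        · exact Or.inr (h ▸ List.mem_cons_self)
        · exact Or.inr (List.mem_cons_of_mem _ h)
      · intro _
        by_cases hmy : m = y
        · rw [hmy]; exact hk
        · exact lt_trans (m2 hmy) hk
      · intro j hj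
        rcases List.mem_cons.mp hj with rfl | hj'
        · by_cases hmy : m = j
          · exact Or.inr ⟨by rw [hmy], le_of_eq hmy⟩
          · exact Or.inl (m2 hmy)
        · exact m3 j hj'
    · rw [if_neg hk]
      obtain ⟨m1, m2, m3⟩ := ih x (fun j hj => hx j (List.mem_cons_of_mem _ hj)) hp'
      set m := t'.foldl (fun m y => if key y < key m then y else m) x with hm
      refine ⟨?_, m2, ?_⟩
      · rcases m1 with h | h
        · exact Or.inl h
        · exact Or.inr (List.mem_cons_of_mem _ h)
      · intro j hj
        rcases List.mem_cons.mp hj with rfl | hj'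
        · by_cases hmx : m = x
          · rcases lt_or_eq_of_le (not_lt.mp hk) with h | h
            · exact Or.inl (by rw [hmx]; exact h)
            · exact Or.inr ⟨by rw [hmx, h], le_of_lt (hmx ▸ hx j List.mem_cons_self)⟩
          · exact Or.inl (lt_of_lt_of_le (m2 hmx) (not_lt.mp hk))
        · exact m3 j hj'

-- corollary: min? of a strictly increasing list returns the first index with minimal key
theorem min?_first_min {C : List Int} {key : Int → Int} {m : Int}
    (hp : C.Pairwise (· < ·)) (hm : PySem.List.min? C key = some m) :
    m ∈ C ∧ ∀ j ∈ C, key m < key j ∨ (key m = key j ∧ m ≤ j) := by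
  cases C with
  | nil => simp [PySem.List.min?] at hm
  | cons c t =>
    rw [min?_cons key t c] at hm
    injection hm with hm
    rcases List.pairwise_cons.mp hp with ⟨hc, ht⟩
    obtain ⟨m1, m2, m3⟩ := foldl_min_first key t c hc ht
    rw [hm] at m1 m2 m3
    constructor
    · rcases m1 with h | h
      · exact h ▸ List.mem_cons_self
      · exact List.mem_cons_of_mem _ h
    · intro j hj
      rcases List.mem_cons.mp hj with rfl | hj'
      · by_cases hmc : m = j
        · exact Or.inr ⟨by rw [hmc], le_of_eq hmc⟩
        · exact Or.inl (m2 hmc)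
      · exact m3 j hj'

-- A's loop once it holds a real index j ≥ 0 equals min? of the remaining candidates with j prepended.
theorem loop_some (pr : Int → Bool) (key : Int → Int) :
    ∀ (l : List Int) (j : Int), (∀ x ∈ l, 0 ≤ x) → 0 ≤ j →
    l.foldl (fun s i => if pr i then (if s == -1 then i else if key i < key s then i else s) else s) j
      = (PySem.List.min? (j :: l.filter pr) key).getD (-1) := by
  intro l
  induction l with
  | nil => intro j _ _; simp [PySem.List.min?]
  | cons i t ih =>
    intro j h hj
    have hi : 0 ≤ i := h i (by simp)
    have ht : ∀ x ∈ t, 0 ≤ x := fun x hx => h x (by simp [hx])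
    by_cases hpr : pr i
    · have hne : (j == -1) = false := by simp; omega
      rw [List.foldl_cons]
      simp only [hpr, hne, if_true, Bool.false_eq_true, if_false]
      by_cases hk : key i < key j
      · rw [if_pos hk, ih i ht hi]
        simp only [PySem.List.min?, List.filter_cons_of_pos hpr, List.foldl_cons, hk, if_true]
      · rw [if_neg hk, ih j ht hj]
        simp only [PySem.List.min?, List.filter_cons_of_pos hpr, List.foldl_cons, hk, if_false]
    · rw [List.foldl_cons]
      simp only [hpr, Bool.false_eq_true, if_false]
      rw [ih j ht hj]
      simp only [PySem.List.min?, List.filter_cons_of_neg hpr]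

-- A's loop from the -1 sentinel IS min? of the candidate index list, with default -1.
theorem loop_none (pr : Int → Bool) (key : Int → Int) :
    ∀ (l : List Int), (∀ x ∈ l, 0 ≤ x) →
    l.foldl (fun s i => if pr i then (if s == -1 then i else if key i < key s then i else s) else s) (-1)
      = (PySem.List.min? (l.filter pr) key).getD (-1) := by
  intro l
  induction l with
  | nil => intro _; simp [PySem.List.min?]
  | cons i t ih =>
    intro h
    have hi : 0 ≤ i := h i (by simp)
    have ht : ∀ x ∈ t, 0 ≤ x := fun x hx => h x (by simp [hx])
    by_cases hpr : pr i
    · rw [List.foldl_cons]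
      simp only [hpr, if_true, beq_self_eq_true]
      rw [loop_some pr key t i ht hi]
      simp only [List.filter_cons_of_pos hpr]
    · rw [List.foldl_cons]
      simp only [hpr, Bool.false_eq_true, if_false]
      rw [ih ht, List.filter_cons_of_neg hpr]

-- ===== VERDICT (by name: the statement is the Claim_ definition above) =====
theorem findSmallestOddPrimeIndex_spec : Claim_equal_findSmallestOddPrimeIndex := by
  intro arr _
  unfold Spec_findSmallestOddPrimeIndex findSmallestOddPrimeIndex findSmallestOddPrimeIndex_alt
  dsimp only
  set key : Int → Int := fun i => PySem.List.pyGetD arr i 0 with hkey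
  set pr : Int → Bool := fun i => isOddPrime (key i) with hpr
  set R := PySem.List.pyRange 0 (PySem.List.len arr) 1 with hR
  have hRpos : ∀ x ∈ R, 0 ≤ x := fun x hx => by
    have := (PySem.List.mem_pyRange_one (a := 0) (b := PySem.List.len arr) (x := x)).mp hx
    omega
  have hA := loop_none pr key R hRpos
  set f : Int → Int × Int := fun i => (key i, i) with hf
  set pairs := R.map f with hpairs
  set S := PySem.List.sorted2 pairs (fun p => p.1) (fun p => p.2) with hS
  set pred : Int × Int → Bool := fun p => isOddPrime p.1 with hpred
  have hperm : S.Perm pairs := PySem.List.sorted2_perm pairs _ _ false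
  have hCpw : (R.filter pr).Pairwise (· < ·) :=
    (PySem.List.pairwise_lt_pyRange_one 0 (PySem.List.len arr)).filter pr
  -- rewrite both results
  rw [hA]
  cases hfind : S.find? pred with
  | none =>
    -- no prime anywhere: candidate list is empty
    have hall := List.find?_eq_none.mp hfind
    have hC : R.filter pr = [] := by
      rw [List.eq_nil_iff_forall_not_mem]
      intro j hj
      rcases List.mem_filter.mp hj with ⟨hjR, hjp⟩
      have hmem : f j ∈ S := hperm.mem_iff.mpr (List.mem_map_of_mem hjR)
      have := hall (f j) hmem
      exact absurd hjp (by simpa [hpred, hf, hpr] using this)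
    rw [hC]
    simp [PySem.List.min?]
  | some p =>
    obtain ⟨hpp, hpS, hpmin⟩ := find?_first (sorted2_pairwise pairs) hfind
    obtain ⟨i, hiR, hip⟩ := List.mem_map.mp (hperm.mem_iff.mp hpS)
    have hpri : pr i = true := by
      have : pred (f i) = true := by rw [hip]; exact hpp
      simpa [hpred, hf, hpr] using this
    have hiC : i ∈ R.filter pr := List.mem_filter.mpr ⟨hiR, hpri⟩
    -- min? is some because the candidate list is nonempty
    cases hmin : PySem.List.min? (R.filter pr) key with
    | none =>
      rw [PySem.List.min?_eq_none_iff] at hmin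
      rw [hmin] at hiC; simp at hiC
    | some m =>
      obtain ⟨hmC, hmmin⟩ := min?_first_min hCpw hmin
      -- lex comparison both ways forces i = m
      have h1 : wle (f i) (f m) := by
        rw [hip]
        refine hpmin (f m) (hperm.mem_iff.mpr (List.mem_map_of_mem (List.mem_filter.mp hmC).1)) ?_
        have : pr m = true := (List.mem_filter.mp hmC).2
        simpa [hpred, hf, hpr] using this
      have h2 := hmmin i hiC
      have him : i = m := by
        simp only [wle, hf] at h1
        rcases h1 with h | h <;> rcases h2 with h' | h' <;> omega
      rw [← hip, hf]
      simp [him]
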